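-- pv_equiv track=rewrite | github.com/Mehdi-Abbas-Arduino/HackerRank-Test- | second.py | maxCost
-- ===== SOURCE A (Python) =====
-- def maxCost(cost, labels, dailyCount):
--     total_cost = 0
--     day_cost = 0
--     legal_count = 0
--     max_day_cost = 0
--
--     for i in range(len(cost)):
--         day_cost += cost[i]
--         if labels[i] == "legal":
--             legal_count += 1
--
--         if legal_count == dailyCount:
--             max_day_cost = max(max_day_cost, day_cost)
--             day_cost = 0
--             legal_count = 0
--
--     return max_day_cost
-- ===== SOURCE B (Python) =====
-- def maxCost(cost, labels, dailyCount):
--     if dailyCount <= 0: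
--         return 0
--     prefix = [0]
--     running = 0
--     for c in cost:
--         running += c
--         prefix.append(running)
--     legal_pos = [i for i, lab in enumerate(labels[:len(cost)]) if lab == "legal"]
--     best = 0
--     start = 0
--     while len(legal_pos) >= dailyCount:
--         end = legal_pos[dailyCount - 1]
--         best = max(best, prefix[end + 1] - prefix[start])
--         start = end + 1
--         legal_pos = legal_pos[dailyCount:]
--     return best
-- ===== Notes on version B (the rewrite author's own statement) =====
-- stated objective: alternative
-- what changed: B replaces A's single stateful scan (running day cost + legal counter with in-loop resets) by a prefix-sum array plus the list of legal-label positions, taking every dailyCount-th legal position as a day boundary and computing each day's cost as a prefix-sum difference.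
-- intended difference: When dailyCount is 0 and some positive cost precedes the first "legal" label, A's legal_count==dailyCount test fires on every such day and A returns the largest of those single-day costs, an artefact of its reset logic; B returns 0, the intended value since no day can be completed by 0 legal jobs. — e.g. on maxCost([1], ["x"], 0): A returns 1, B returns 0
import Mathlib
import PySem

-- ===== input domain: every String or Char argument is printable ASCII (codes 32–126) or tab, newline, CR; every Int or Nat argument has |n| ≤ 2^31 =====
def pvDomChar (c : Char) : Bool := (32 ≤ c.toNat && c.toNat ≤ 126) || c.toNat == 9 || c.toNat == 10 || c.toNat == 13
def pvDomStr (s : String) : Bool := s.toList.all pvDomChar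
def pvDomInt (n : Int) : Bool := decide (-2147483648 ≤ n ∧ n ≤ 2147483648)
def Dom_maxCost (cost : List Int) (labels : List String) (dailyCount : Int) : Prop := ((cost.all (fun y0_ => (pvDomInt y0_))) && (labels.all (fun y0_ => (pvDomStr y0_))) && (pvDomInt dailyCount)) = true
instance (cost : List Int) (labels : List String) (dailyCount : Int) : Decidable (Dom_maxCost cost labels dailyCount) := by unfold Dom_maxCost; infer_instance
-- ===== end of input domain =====

-- B computes the same answer from a pfx-sum array and the list of legal-label positions
-- (every dailyCount-th legal position is a day boundary); equivalence is about the return value only.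

-- ===== PORT A =====
def maxCost (cost : List Int) (labels : List String) (dailyCount : Int) : Int :=
  ((PySem.List.pyRange 0 (cost.length : Int) 1).foldl
    (fun (st : Int × Int × Int) i =>
      let day := st.1 + PySem.List.pyGetD cost i 0
      let legal := if PySem.List.pyGetD labels i "" = "legal" then st.2.1 + 1 else st.2.1
      if legal = dailyCount then (0, 0, max st.2.2 day) else (day, legal, st.2.2))
    (0, 0, 0)).2.2

-- ===== PORT B =====
-- the while loop of Source B: consume the legal positions dailyCount at a time
def altLoop (pfx : List Int) (d : Int) (hd : 0 < d) (legal : List Int) (start : Int) (best : Int) : Int :=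
  if h : d ≤ (legal.length : Int) then
    altLoop pfx d hd (PySem.List.slice legal (some d) none)
      (PySem.List.pyGetD legal (d - 1) 0 + 1)
      (max best (PySem.List.pyGetD pfx (PySem.List.pyGetD legal (d - 1) 0 + 1) 0 -
                 PySem.List.pyGetD pfx start 0))
  else best
termination_by legal.length
decreasing_by
  rw [PySem.List.slice_from legal (le_of_lt hd)]
  simp only [List.length_drop]
  omega

def maxCost_alt (cost : List Int) (labels : List String) (dailyCount : Int) : Int :=
  if h : dailyCount ≤ 0 then 0
  else
    let pfx := (cost.foldl (fun (p : List Int × Int) c => (p.1 ++ [p.2 + c], p.2 + c)) ([0], 0)).1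
    let legalPos := ((PySem.List.enumerate (PySem.List.slice labels none (some (cost.length : Int))) 0).filter
        (fun q => q.2 == "legal")).map (fun q => q.1)
    altLoop pfx dailyCount (by omega) legalPos 0 0

-- ===== PRECONDITION & SPEC =====
-- A raises IndexError (labels[i]) as soon as labels is shorter than cost; exactly those inputs are excluded.
def Pre_maxCost (cost : List Int) (labels : List String) (dailyCount : Int) : Prop :=
  cost.length ≤ labels.length
instance (cost : List Int) (labels : List String) (dailyCount : Int) : Decidable (Pre_maxCost cost labels dailyCount) := by unfold Pre_maxCost; infer_instance
def pvWitness_maxCost : List Int × List String × Int := ([3, 1], ["legal", "x"], 1)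

-- When dailyCount is 0 and some positive cost precedes the first "legal" label, A's
-- legal_count==dailyCount test fires on every such day and A returns the largest of those
-- single-day costs, an artefact of its reset logic; B returns 0, the intended value since
-- no day can be completed by 0 legal jobs.
def D_maxCost (cost : List Int) (labels : List String) (dailyCount : Int) : Prop :=
  dailyCount = 0 ∧ ∃ c ∈ cost.take (labels.takeWhile (fun l => !(l == "legal"))).length, 0 < c
instance (cost : List Int) (labels : List String) (dailyCount : Int) : Decidable (D_maxCost cost labels dailyCount) := by unfold D_maxCost; infer_instance

def Spec_maxCost (cost : List Int) (labels : List String) (dailyCount : Int) (out : Int) : Prop :=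
  ¬ D_maxCost cost labels dailyCount → out = maxCost_alt cost labels dailyCount
instance (cost : List Int) (labels : List String) (dailyCount : Int) (out : Int) : Decidable (Spec_maxCost cost labels dailyCount out) := by unfold Spec_maxCost; infer_instance

def pvDiffWitness_maxCost : List Int × List String × Int := ([1], ["x"], 0)
def pvDiffWitnessOut_maxCost : Int × Int := (1, 0)

-- ===== CLAIM (what is proved, stated in full; the proofs are below) =====
def Claim_unchanged_maxCost : Prop := ∀ (cost : List Int) (labels : List String) (dailyCount : Int), Dom_maxCost cost labels dailyCount → Pre_maxCost cost labels dailyCount → Spec_maxCost cost labels dailyCount (maxCost cost labels dailyCount)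
def Claim_changed_maxCost : Prop := Dom_maxCost (pvDiffWitness_maxCost.1) (pvDiffWitness_maxCost.2.1) (pvDiffWitness_maxCost.2.2) ∧ Pre_maxCost (pvDiffWitness_maxCost.1) (pvDiffWitness_maxCost.2.1) (pvDiffWitness_maxCost.2.2) ∧ D_maxCost (pvDiffWitness_maxCost.1) (pvDiffWitness_maxCost.2.1) (pvDiffWitness_maxCost.2.2) ∧ maxCost (pvDiffWitness_maxCost.1) (pvDiffWitness_maxCost.2.1) (pvDiffWitness_maxCost.2.2) = pvDiffWitnessOut_maxCost.1 ∧ maxCost_alt (pvDiffWitness_maxCost.1) (pvDiffWitness_maxCost.2.1) (pvDiffWitness_maxCost.2.2) = pvDiffWitnessOut_maxCost.2 ∧ pvDiffWitnessOut_maxCost.1 ≠ pvDiffWitnessOut_maxCost.2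
def Claim_exact_maxCost : Prop := ∀ (cost : List Int) (labels : List String) (dailyCount : Int), Dom_maxCost cost labels dailyCount → Pre_maxCost cost labels dailyCount → D_maxCost cost labels dailyCount → maxCost cost labels dailyCount ≠ maxCost_alt cost labels dailyCount

-- ===== LEMMAS AND PROOFS =====

-- common reference recursion: A's loop state over the two lists, legal counter as a Nat
def g : List Int → List String → Nat → Int → Nat → Int → Int
  | [], _, _, _, _, mx => mx
  | _ :: _, [], _, _, _, mx => mx
  | c :: cs, lab :: ls, d, day, legal, mx =>
    if (if lab = "legal" then legal + 1 else legal) = d then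
      g cs ls d 0 0 (max mx (day + c))
    else
      g cs ls d (day + c) (if lab = "legal" then legal + 1 else legal) mx

-- pfx sums from a running value
def psums (r : Int) : List Int → List Int
  | [] => []
  | c :: cs => (r + c) :: psums (r + c) cs

-- the legal-position list of Source B's comprehension, parametrised by the enumerate offset
def lps (ls : List String) (ofs : Int) : List Int :=
  ((PySem.List.enumerate ls ofs).filter (fun q => q.2 == "legal")).map (fun q => q.1)


theorem getD_append_len {α : Type} (pre : List α) (y : α) (ys : List α) (d : α) :
    (pre ++ y :: ys).getD pre.length d = y := by
  simp [List.getD_eq_getElem?_getD]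

theorem auxA (d : Int) (hd : 0 ≤ d) :
    ∀ (cs : List Int) (pc : List Int) (ls pl : List String),
    pc.length = pl.length → cs.length ≤ ls.length →
    ∀ (day : Int) (legal : Nat) (mx : Int),
    ((PySem.List.pyRange (pc.length : Int) (((pc.length + cs.length : Nat) : Nat) : Int) 1).foldl
       (fun (st : Int × Int × Int) i =>
         let day := st.1 + PySem.List.pyGetD (pc ++ cs) i 0
         let legal := if PySem.List.pyGetD (pl ++ ls) i "" = "legal" then st.2.1 + 1 else st.2.1
         if legal = d then (0, 0, max st.2.2 day) else (day, legal, st.2.2))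
       (day, (legal : Int), mx)).2.2
     = g cs ls d.toNat day legal mx
  | [], pc, ls, pl, hpl, hlen, day, legal, mx => by
    simp [PySem.List.pyRange_one_eq_nil, g]
  | c :: cs', pc, [], pl, hpl, hlen, day, legal, mx => by simp at hlen
  | c :: cs', pc, lab :: ls', pl, hpl, hlen, day, legal, mx => by
    have hr := PySem.List.pyRange_one_cons
      (show (pc.length : Int) < ((pc.length + (c :: cs').length : Nat) : Int) by simp)
    rw [hr, List.foldl_cons]
    have hc : PySem.List.pyGetD (pc ++ c :: cs') (pc.length : Int) 0 = c := by
      rw [PySem.List.pyGetD_natCast, getD_append_len]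
    have hl : PySem.List.pyGetD (pl ++ lab :: ls') (pc.length : Int) "" = lab := by
      rw [PySem.List.pyGetD_natCast, hpl, getD_append_len]
    have key : ∀ (st : Int × Int × Int),
        ((PySem.List.pyRange ((pc.length : Int) + 1) (((pc.length + (c :: cs').length : Nat) : Nat) : Int) 1).foldl
         (fun (st : Int × Int × Int) i =>
           let day := st.1 + PySem.List.pyGetD (pc ++ c :: cs') i 0
           let legal := if PySem.List.pyGetD (pl ++ lab :: ls') i "" = "legal" then st.2.1 + 1 else st.2.1
           if legal = d then (0, 0, max st.2.2 day) else (day, legal, st.2.2)) st).2.2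
        = ((PySem.List.pyRange (((pc ++ [c]).length : Nat) : Int) ((((pc ++ [c]).length + cs'.length : Nat) : Nat) : Int) 1).foldl
         (fun (st : Int × Int × Int) i =>
           let day := st.1 + PySem.List.pyGetD ((pc ++ [c]) ++ cs') i 0
           let legal := if PySem.List.pyGetD ((pl ++ [lab]) ++ ls') i "" = "legal" then st.2.1 + 1 else st.2.1
           if legal = d then (0, 0, max st.2.2 day) else (day, legal, st.2.2)) st).2.2 := by
      intro st
      have h1 : ((pc ++ [c]).length : Int) = (pc.length : Int) + 1 := by simp
      have h2 : (((pc ++ [c]).length + cs'.length : Nat) : Int) = ((pc.length + (c :: cs').length : Nat) : Int) := by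
        simp; omega
      rw [h1, h2, List.append_assoc, List.append_assoc, List.singleton_append,
        List.singleton_append]
    simp only [hc, hl]
    simp only [g]
    by_cases hlab : lab = "legal"
    · rw [if_pos hlab, if_pos hlab]
      by_cases heq : legal + 1 = d.toNat
      · rw [if_pos (show (legal : Int) + 1 = d by omega), if_pos heq, key]
        have := auxA d hd cs' (pc ++ [c]) ls' (pl ++ [lab]) (by simp [hpl]) (by simpa using hlen) 0 0 (max mx (day + c))
        simpa using this
      · rw [if_neg (show ¬ ((legal : Int) + 1 = d) by omega), if_neg heq, key]
        have := auxA d hd cs' (pc ++ [c]) ls' (pl ++ [lab]) (by simp [hpl]) (by simpa using hlen) (day + c) (legal + 1) mx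
        simpa using this
    · rw [if_neg hlab, if_neg hlab]
      by_cases heq : legal = d.toNat
      · rw [if_pos (show (legal : Int) = d by omega), if_pos heq, key]
        have := auxA d hd cs' (pc ++ [c]) ls' (pl ++ [lab]) (by simp [hpl]) (by simpa using hlen) 0 0 (max mx (day + c))
        simpa using this
      · rw [if_neg (show ¬ ((legal : Int) = d) by omega), if_neg heq, key]
        have := auxA d hd cs' (pc ++ [c]) ls' (pl ++ [lab]) (by simp [hpl]) (by simpa using hlen) (day + c) legal mx
        simpa using this

theorem maxCost_A_bridge (cost : List Int) (labels : List String) (dailyCount : Int)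
    (hlen : cost.length ≤ labels.length) (hd : 0 ≤ dailyCount) :
    maxCost cost labels dailyCount = g cost labels dailyCount.toNat 0 0 0 := by
  have := auxA dailyCount hd cost [] labels [] rfl hlen 0 0 0
  simpa [maxCost] using this

theorem maxCost_A_neg (cost : List Int) (labels : List String) (dailyCount : Int)
    (hd : dailyCount < 0) : maxCost cost labels dailyCount = 0 := by
  have key : ∀ (is : List Int) (st : Int × Int × Int), 0 ≤ st.2.1 →
      ((is.foldl (fun (st : Int × Int × Int) i =>
        let day := st.1 + PySem.List.pyGetD cost i 0
        let legal := if PySem.List.pyGetD labels i "" = "legal" then st.2.1 + 1 else st.2.1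
        if legal = dailyCount then (0, 0, max st.2.2 day) else (day, legal, st.2.2)) st)).2.2
        = st.2.2 := by
    intro is
    induction is with
    | nil => intro st h; rfl
    | cons i is ih =>
      intro st h
      rw [List.foldl_cons]
      have hpos : 0 ≤ (if PySem.List.pyGetD labels i "" = "legal" then st.2.1 + 1 else st.2.1) := by
        split_ifs <;> omega
      have hcond : ¬ ((if PySem.List.pyGetD labels i "" = "legal" then st.2.1 + 1 else st.2.1) = dailyCount) := by
        omega
      simp only [if_neg hcond]
      exact ih _ hpos
  simpa [maxCost] using key (PySem.List.pyRange 0 (cost.length : Int) 1) (0, 0, 0) (by norm_num)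

theorem foldl_pref (cs : List Int) : ∀ (l : List Int) (r : Int),
    cs.foldl (fun (p : List Int × Int) c => (p.1 ++ [p.2 + c], p.2 + c)) (l, r)
      = (l ++ psums r cs, r + cs.sum) := by
  induction cs with
  | nil => intro l r; simp [psums]
  | cons c cs ih =>
    intro l r
    rw [List.foldl_cons, ih]
    simp only [psums, Prod.mk.injEq]
    refine ⟨?_, ?_⟩
    · rw [List.append_assoc, List.singleton_append]
    · rw [List.sum_cons]; ring

theorem psums_getD (cs : List Int) : ∀ (r : Int) (k : Nat), k < cs.length →
    (psums r cs).getD k 0 = r + (cs.take (k + 1)).sum := by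
  induction cs with
  | nil => intro r k hk; simp at hk
  | cons c cs ih =>
    intro r k hk
    cases k with
    | zero => simp [psums]
    | succ k =>
      have := ih (r + c) k (by simpa using hk)
      simp only [psums, List.getD_cons_succ, this, List.take_succ_cons, List.sum_cons]
      ring

theorem pref_getD (cost : List Int) : ∀ (k : Nat), k ≤ cost.length →
    (0 :: psums 0 cost).getD k 0 = (cost.take k).sum := by
  intro k hk
  cases k with
  | zero => simp
  | succ k =>
    rw [List.getD_cons_succ, psums_getD cost 0 k (by omega), zero_add]

theorem lps_cons (lab : String) (ls : List String) (ofs : Int) :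
    lps (lab :: ls) ofs = (if lab = "legal" then [ofs] else []) ++ lps ls (ofs + 1) := by
  by_cases h : lab = "legal" <;> simp [lps, PySem.List.enumerate_cons, h]

theorem lps_length (ls : List String) : ∀ (ofs : Int),
    (lps ls ofs).length = ls.countP (fun l => l == "legal") := by
  induction ls with
  | nil => intro ofs; simp [lps]
  | cons lab ls ih =>
    intro ofs
    rw [lps_cons, List.countP_cons]
    by_cases h : lab = "legal" <;> simp [h, ih]

theorem lps_split (ls : List String) : ∀ (ofs : Int) (j : Nat), j < (lps ls ofs).length →
    ∃ (k : Nat), (lps ls ofs).getD j 0 = ofs + (k : Int) ∧ k < ls.length ∧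
      ls[k]? = some "legal" ∧
      (ls.take (k + 1)).countP (fun l => l == "legal") = j + 1 ∧
      (lps ls ofs).drop (j + 1) = lps (ls.drop (k + 1)) (ofs + (k : Int) + 1) := by
  induction ls with
  | nil => intro ofs j hj; simp [lps] at hj
  | cons lab ls ih =>
    intro ofs j hj
    by_cases hlab : lab = "legal"
    · rw [lps_cons] at hj ⊢
      rw [if_pos hlab] at hj ⊢
      rw [List.singleton_append] at hj ⊢
      cases j with
      | zero =>
        refine ⟨0, by simp, by simp, by simp [hlab], by simp [hlab], by simp⟩
      | succ j =>
        obtain ⟨k, h1, h2, h3, h4, h5⟩ := ih (ofs + 1) j (by simpa using hj)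
        refine ⟨k + 1, ?_, by simpa using h2, by simpa using h3, ?_, ?_⟩
        · rw [List.getD_cons_succ, h1]; push_cast; ring
        · rw [List.take_succ_cons, List.countP_cons]
          simp [hlab, h4]
        · rw [List.drop_succ_cons, h5, List.drop_succ_cons]
          congr 1
          push_cast; ring
    · rw [lps_cons] at hj ⊢
      rw [if_neg hlab] at hj ⊢
      rw [List.nil_append] at hj ⊢
      obtain ⟨k, h1, h2, h3, h4, h5⟩ := ih (ofs + 1) j hj
      refine ⟨k + 1, ?_, by simpa using h2, by simpa using h3, ?_, ?_⟩
      · rw [h1]; push_cast; ring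
      · rw [List.take_succ_cons, List.countP_cons]
        simp [hlab, h4]
      · rw [h5, List.drop_succ_cons]
        congr 1
        push_cast; ring

theorem g_frozen : ∀ (cs : List Int) (ls : List String) (D l : Nat) (day mx : Int),
    D < l → g cs ls D day l mx = mx := by
  intro cs
  induction cs with
  | nil => intro ls D l day mx h; rfl
  | cons c cs ih =>
    intro ls D l day mx h
    cases ls with
    | nil => rfl
    | cons lab ls =>
      by_cases hlab : lab = "legal"
      · simp only [g, if_pos hlab]
        rw [if_neg (show ¬((l + 1 : Nat) = D) by omega)]
        exact ih _ _ _ _ _ (by omega)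
      · simp only [g, if_neg hlab]
        rw [if_neg (show ¬(l = D) by omega)]
        exact ih _ _ _ _ _ h

theorem g_mono : ∀ (cs : List Int) (ls : List String) (D : Nat) (day : Int) (l : Nat) (mx : Int),
    mx ≤ g cs ls D day l mx := by
  intro cs
  induction cs with
  | nil => intro ls D day l mx; exact le_refl _
  | cons c cs ih =>
    intro ls D day l mx
    cases ls with
    | nil => exact le_refl _
    | cons lab ls =>
      simp only [g]
      split_ifs <;>
        first
          | exact le_trans (le_max_left _ _) (ih _ _ _ _ _)
          | exact ih _ _ _ _ _

theorem countP_cons_legal (lab : String) (ls : List String) :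
    (lab :: ls).countP (fun x => x == "legal")
      = ls.countP (fun x => x == "legal") + (if lab = "legal" then 1 else 0) := by
  rw [List.countP_cons]
  by_cases h : lab = "legal" <;> simp [h]

theorem g_noreset : ∀ (cs : List Int) (ls : List String) (D l : Nat) (day mx : Int),
    (ls.take cs.length).countP (fun x => x == "legal") + l < D →
    g cs ls D day l mx = mx := by
  intro cs
  induction cs with
  | nil => intro ls D l day mx h; rfl
  | cons c cs ih =>
    intro ls D l day mx h
    cases ls with
    | nil => rfl
    | cons lab ls =>
      rw [List.length_cons, List.take_succ_cons, countP_cons_legal] at h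
      by_cases hlab : lab = "legal"
      · rw [if_pos hlab] at h
        simp only [g, if_pos hlab]
        rw [if_neg (show ¬(l + 1 = D) by omega)]
        exact ih ls D (l + 1) (day + c) mx (by omega)
      · rw [if_neg hlab] at h
        simp only [g, if_neg hlab]
        rw [if_neg (show ¬(l = D) by omega)]
        exact ih ls D l (day + c) mx (by omega)

theorem g_split : ∀ (e : Nat) (cs : List Int) (ls : List String) (D l : Nat) (day mx : Int),
    l < D → e < cs.length → e < ls.length → ls[e]? = some "legal" →
    (ls.take (e + 1)).countP (fun x => x == "legal") + l = D →
    g cs ls D day l mx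
      = g (cs.drop (e + 1)) (ls.drop (e + 1)) D 0 0 (max mx (day + (cs.take (e + 1)).sum)) := by
  intro e
  induction e with
  | zero =>
    intro cs ls D l day mx hl hc hls hleg hcount
    match cs, ls with
    | c :: cs', lab :: ls' =>
      have hlab : lab = "legal" := by simpa using hleg
      rw [List.take_succ_cons, countP_cons_legal, if_pos hlab] at hcount
      simp only [List.take_zero, List.countP_nil] at hcount
      simp only [g, if_pos hlab]
      rw [if_pos (show l + 1 = D by omega)]
      simp
  | succ e ih =>
    intro cs ls D l day mx hl hc hls hleg hcount
    match cs, ls with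
    | c :: cs', lab :: ls' =>
      have hleg' : ls'[e]? = some "legal" := by simpa using hleg
      have he1 : e < cs'.length := by simpa using hc
      have he2 : e < ls'.length := by simpa using hls
      have hmem : "legal" ∈ ls'.take (e + 1) := by
        have h0 : (ls'.take (e + 1))[e]? = some "legal" := by
          rw [List.getElem?_take_of_lt (by omega)]; exact hleg'
        exact List.mem_of_getElem? h0
      have hcnt1 : 1 ≤ (ls'.take (e + 1)).countP (fun x => x == "legal") := by
        have h1 : (ls'.take (e + 1)).countP (fun x => x == "legal")
            = (ls'.take (e + 1)).count "legal" := rfl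
        rw [h1]
        exact List.count_pos_iff.mpr hmem
      rw [List.take_succ_cons, countP_cons_legal] at hcount
      by_cases hlab : lab = "legal"
      · rw [if_pos hlab] at hcount
        simp only [g, if_pos hlab]
        rw [if_neg (show ¬(l + 1 = D) by omega)]
        rw [ih cs' ls' D (l + 1) (day + c) mx (by omega) he1 he2 hleg' (by omega)]
        simp only [List.drop_succ_cons, List.take_succ_cons, List.sum_cons]
        congr 2
        ring
      · rw [if_neg hlab] at hcount
        simp only [g, if_neg hlab]
        rw [if_neg (show ¬(l = D) by omega)]
        rw [ih cs' ls' D l (day + c) mx hl he1 he2 hleg' (by omega)]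
        simp only [List.drop_succ_cons, List.take_succ_cons, List.sum_cons]
        congr 2
        ring

theorem g_take : ∀ (cs : List Int) (ls : List String) (D : Nat) (day : Int) (l : Nat) (mx : Int),
    g cs (ls.take cs.length) D day l mx = g cs ls D day l mx := by
  intro cs
  induction cs with
  | nil => intro ls D day l mx; cases ls <;> rfl
  | cons c cs ih =>
    intro ls D day l mx
    cases ls with
    | nil => rfl
    | cons lab ls =>
      rw [List.length_cons, List.take_succ_cons]
      simp only [g]
      split_ifs <;> exact ih _ _ _ _ _

theorem altLoop_g (cost : List Int) (labels : List String) (d : Int) (hd : 0 < d)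
    (hlen : cost.length ≤ labels.length) :
    ∀ (ms : Nat) (s : Nat) (best : Int), s ≤ cost.length →
    (lps ((labels.take cost.length).drop s) (s : Int)).length ≤ ms →
    altLoop (0 :: psums 0 cost) d hd (lps ((labels.take cost.length).drop s) (s : Int)) (s : Int) best
      = g (cost.drop s) ((labels.take cost.length).drop s) d.toNat 0 0 best := by
  have hLlen : ∀ (s : Nat), ((labels.take cost.length).drop s).length = cost.length - s := by
    intro s
    rw [List.length_drop, List.length_take]
    omega
  intro ms
  induction ms with
  | zero =>
    intro s best hs hms
    rw [altLoop, dif_neg (show ¬ (d ≤ ((lps ((labels.take cost.length).drop s) (s : Int)).length : Int)) by omega)]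
    refine (g_noreset _ _ _ _ _ _ ?_).symm
    rw [show ((labels.take cost.length).drop s).take (cost.drop s).length
          = (labels.take cost.length).drop s by
        rw [List.length_drop, ← hLlen s, List.take_length]]
    rw [← lps_length ((labels.take cost.length).drop s) (s : Int)]
    omega
  | succ ms ih =>
    intro s best hs hms
    by_cases hcond : d ≤ ((lps ((labels.take cost.length).drop s) (s : Int)).length : Int)
    · rw [altLoop, dif_pos hcond]
      have hj : (d - 1).toNat < (lps ((labels.take cost.length).drop s) (s : Int)).length := by omega
      obtain ⟨k, hk1, hk2, hk3, hk4, hk5⟩ :=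
        lps_split ((labels.take cost.length).drop s) (s : Int) (d - 1).toNat hj
      have hkn : k < cost.length - s := by rw [hLlen s] at hk2; exact hk2
      have he : PySem.List.pyGetD (lps ((labels.take cost.length).drop s) (s : Int)) (d - 1) 0
          = (s : Int) + (k : Int) := by
        rw [show (d - 1 : Int) = (((d - 1).toNat : Nat) : Int) from by omega,
          PySem.List.pyGetD_natCast]
        exact hk1
      have hdt : d.toNat = (d - 1).toNat + 1 := by omega
      have hslice : PySem.List.slice (lps ((labels.take cost.length).drop s) (s : Int)) (some d) none
          = lps (((labels.take cost.length).drop s).drop (k + 1)) ((s : Int) + (k : Int) + 1) := by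
        rw [PySem.List.slice_from _ (le_of_lt hd), hdt, hk5]
      have hdrop : ((labels.take cost.length).drop s).drop (k + 1)
          = (labels.take cost.length).drop (s + (k + 1)) := by
        rw [List.drop_drop]
      have hsumhi : PySem.List.pyGetD (0 :: psums 0 cost) ((s : Int) + (k : Int) + 1) 0
          = (cost.take (s + k + 1)).sum := by
        rw [show (s : Int) + (k : Int) + 1 = ((s + k + 1 : Nat) : Int) from by push_cast; ring,
          PySem.List.pyGetD_natCast]
        exact pref_getD cost (s + k + 1) (by omega)
      have hsumlo : PySem.List.pyGetD (0 :: psums 0 cost) (s : Int) 0 = (cost.take s).sum := by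
        rw [PySem.List.pyGetD_natCast]
        exact pref_getD cost s (by omega)
      have hsumdiff : (cost.take (s + k + 1)).sum - (cost.take s).sum
          = ((cost.drop s).take (k + 1)).sum := by
        rw [Nat.add_assoc, List.take_add, List.sum_append]
        ring
      have hgs := g_split k (cost.drop s) ((labels.take cost.length).drop s) d.toNat 0 0 best
        (by omega) (by rw [List.length_drop]; omega) (by rw [hLlen s]; omega) hk3 (by omega)
      have hbesteq : (cost.take (s + k + 1)).sum - (cost.take s).sum
          = 0 + ((cost.drop s).take (k + 1)).sum := by rw [hsumdiff]; ring
      rw [he, hslice, hsumhi, hsumlo, hbesteq, hgs]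
      rw [hdrop]
      rw [show (cost.drop s).drop (k + 1) = cost.drop (s + (k + 1)) from List.drop_drop]
      rw [show ((s : Int) + (k : Int) + 1) = ((s + (k + 1) : Nat) : Int) from by push_cast; ring]
      refine ih (s + (k + 1)) _ (by omega) ?_
      rw [show ((s + (k + 1) : Nat) : Int) = (s : Int) + (k : Int) + 1 from by push_cast; ring]
      rw [← hdrop, ← hk5, List.length_drop]
      omega
    · rw [altLoop, dif_neg hcond]
      refine (g_noreset _ _ _ _ _ _ ?_).symm
      rw [show ((labels.take cost.length).drop s).take (cost.drop s).length
            = (labels.take cost.length).drop s by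
          rw [List.length_drop, ← hLlen s, List.take_length]]
      rw [← lps_length ((labels.take cost.length).drop s) (s : Int)]
      omega

theorem maxCost_B_bridge (cost : List Int) (labels : List String) (dailyCount : Int)
    (hlen : cost.length ≤ labels.length) (hd : 0 < dailyCount) :
    maxCost_alt cost labels dailyCount = g cost labels dailyCount.toNat 0 0 0 := by
  rw [maxCost_alt, dif_neg (show ¬ dailyCount ≤ 0 by omega)]
  have h1 : (cost.foldl (fun (p : List Int × Int) c => (p.1 ++ [p.2 + c], p.2 + c)) ([0], 0)).1
      = 0 :: psums 0 cost := by
    rw [foldl_pref]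
    simp
  have h2 : PySem.List.slice labels none (some (cost.length : Int)) = labels.take cost.length :=
    PySem.List.slice_to_natCast labels cost.length
  simp only [h1, h2]
  have hb := altLoop_g cost labels dailyCount (by omega) hlen
    (lps ((labels.take cost.length).drop 0) ((0 : Nat) : Int)).length 0 0 (by omega) (le_refl _)
  simp only [List.drop_zero, Nat.cast_zero] at hb
  rw [← g_take cost labels dailyCount.toNat 0 0 0]
  exact hb

theorem g_zero : ∀ (cs : List Int) (ls : List String) (mx : Int), 0 ≤ mx →
    (∀ c ∈ cs.take (ls.takeWhile (fun l => !(l == "legal"))).length, c ≤ 0) →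
    g cs ls 0 0 0 mx = mx := by
  intro cs
  induction cs with
  | nil => intro ls mx hmx h; rfl
  | cons c cs ih =>
    intro ls mx hmx h
    cases ls with
    | nil => rfl
    | cons lab ls =>
      by_cases hlab : lab = "legal"
      · simp only [g, if_pos hlab]
        rw [if_neg (show ¬((0 : Nat) + 1 = 0) by omega)]
        exact g_frozen cs ls 0 1 (0 + c) mx (by omega)
      · rw [List.takeWhile_cons_of_pos (by simp [hlab])] at h
        rw [List.length_cons, List.take_succ_cons] at h
        have hc : c ≤ 0 := h c List.mem_cons_self
        simp only [g, if_neg hlab]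
        rw [if_pos trivial, zero_add]
        rw [max_eq_left (le_trans hc hmx)]
        exact ih ls mx hmx (fun x hx => h x (List.mem_cons_of_mem c hx))

theorem g_pos : ∀ (cs : List Int) (ls : List String) (mx : Int), 0 ≤ mx →
    (∃ c ∈ cs.take (ls.takeWhile (fun l => !(l == "legal"))).length, 0 < c) →
    0 < g cs ls 0 0 0 mx := by
  intro cs
  induction cs with
  | nil => intro ls mx hmx hex; simp at hex
  | cons c cs ih =>
    intro ls mx hmx hex
    cases ls with
    | nil => simp at hex
    | cons lab ls =>
      by_cases hlab : lab = "legal"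
      · rw [List.takeWhile_cons_of_neg (by simp [hlab])] at hex
        simp at hex
      · rw [List.takeWhile_cons_of_pos (by simp [hlab])] at hex
        rw [List.length_cons, List.take_succ_cons] at hex
        obtain ⟨x, hx, hxpos⟩ := hex
        simp only [g, if_neg hlab]
        rw [if_pos trivial, zero_add]
        rcases List.mem_cons.mp hx with rfl | hx'
        · exact lt_of_lt_of_le (lt_of_lt_of_le hxpos (le_max_right mx x)) (g_mono _ _ _ _ _ _)
        · exact ih ls (max mx c) (le_trans hmx (le_max_left mx c)) ⟨x, hx', hxpos⟩


-- ===== VERDICT (by name: the statement is the Claim_ definition above) =====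
theorem maxCost_spec : Claim_unchanged_maxCost := by
  intro cost labels dailyCount hdom hpre
  have hlen : cost.length ≤ labels.length := hpre
  unfold Spec_maxCost
  intro hnD
  rcases lt_trichotomy dailyCount 0 with hlt | rfl | hpos
  · rw [maxCost_A_neg cost labels dailyCount hlt]
    rw [maxCost_alt, dif_pos (le_of_lt hlt)]
  · rw [maxCost_A_bridge cost labels 0 hlen (le_refl 0)]
    rw [maxCost_alt, dif_pos (le_refl (0 : Int))]
    unfold D_maxCost at hnD
    have h : ∀ c ∈ cost.take (labels.takeWhile (fun l => !(l == "legal"))).length, c ≤ 0 := by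
      intro c hc
      by_contra hlt
      exact hnD ⟨rfl, c, hc, by omega⟩
    exact g_zero cost labels 0 (le_refl 0) h
  · rw [maxCost_A_bridge cost labels dailyCount hlen (le_of_lt hpos)]
    exact (maxCost_B_bridge cost labels dailyCount hlen hpos).symm

theorem maxCost_changed : Claim_changed_maxCost := by
  unfold Claim_changed_maxCost; decide

theorem maxCost_tight : Claim_exact_maxCost := by
  intro cost labels dailyCount hdom hpre hD
  obtain ⟨rfl, hex⟩ := hD
  have hlen : cost.length ≤ labels.length := hpre
  rw [maxCost_A_bridge cost labels 0 hlen (le_refl 0)]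
  rw [maxCost_alt, dif_pos (le_refl (0 : Int))]
  exact ne_of_gt (g_pos cost labels 0 (le_refl 0) hex)
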